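-- pv_equiv track=rewrite | github.com/salah743/ChameleFX | tools/patch_py/New folder/apply_hotfix_server_import_order.py | find_future_block
-- ===== SOURCE A (Python) =====
-- def find_future_block(lines: list[str]) -> int:
--     """
--     Return index of the last line of the leading future-import block.
--     If no future imports at top, return -1.
--     """
--     i = 0
--     found = False
--     for idx, line in enumerate(lines):
--         if idx == 0 and line.strip().startswith("from __future__ import"):
--             found = True
--             i = idx
--             continue
--         if found:
--             if line.strip().startswith("from __future__ import"):
--                 i = idx
--                 continue
--             else:
--                 return i
--         else:
--             # first line is not future import → no block
--             break
--     return i if found else -1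
-- ===== SOURCE B (Python) =====
-- def find_future_block(lines: list[str]) -> int:
--     # Collect indices of all lines that are NOT future imports; the minimum
--     # such index (default: len(lines)) is the cut point of the leading block.
--     non_future = [i for i, line in enumerate(lines)
--                   if not line.strip().startswith("from __future__ import")]
--     cut = min(non_future, default=len(lines))
--     return cut - 1 if cut > 0 else -1
-- ===== Notes on version B (the rewrite author's own statement) =====
-- stated objective: alternative
-- what changed: Instead of A's stateful prefix scan with a found flag and early return, B makes one full pass collecting indices of all non-future lines, takes their minimum (default len(lines)) as the cut point, and converts cut to cut-1 or -1.
import Mathlib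
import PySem

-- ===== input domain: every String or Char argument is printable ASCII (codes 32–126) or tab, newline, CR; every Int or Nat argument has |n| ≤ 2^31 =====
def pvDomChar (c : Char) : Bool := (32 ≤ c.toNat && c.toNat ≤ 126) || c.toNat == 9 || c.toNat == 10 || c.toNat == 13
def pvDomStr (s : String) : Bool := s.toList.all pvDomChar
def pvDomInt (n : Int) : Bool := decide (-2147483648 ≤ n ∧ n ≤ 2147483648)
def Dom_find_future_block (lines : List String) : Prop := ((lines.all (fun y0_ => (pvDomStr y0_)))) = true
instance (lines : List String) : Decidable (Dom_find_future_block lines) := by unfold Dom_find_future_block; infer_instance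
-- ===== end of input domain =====

-- B replaces A's stateful prefix scan (found flag, early return) with a full pass that
-- collects indices of non-future lines and takes their minimum as the cut point (alternative decomposition).


-- shared predicate: line.strip().startswith("from __future__ import")
def pvIsFuture (line : String) : Bool :=
  PySem.Str.startswith (PySem.Str.strip line) "from __future__ import"

-- ===== PORT A =====
-- the for-loop with idx/i/found state and early return, step for step
def pvLoopA : List String → Nat → Int → Bool → Int
  | [], _, i, found => if found then i else -1
  | line :: rest, idx, i, found =>
    if idx = 0 ∧ pvIsFuture line = true then
      pvLoopA rest (idx + 1) (idx : Int) true
    else if found then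
      (if pvIsFuture line then pvLoopA rest (idx + 1) (idx : Int) true else i)
    else
      -- break: fall through to the final return
      if found then i else -1

def find_future_block (lines : List String) : Int :=
  pvLoopA lines 0 0 false

-- ===== PORT B =====
-- full pass: indices of non-future lines, min with default len(lines), then convert
def find_future_block_alt (lines : List String) : Int :=
  let nonFuture : List Int :=
    ((PySem.List.enumerate lines).filter (fun p => !(pvIsFuture p.2))).map (fun p => p.1)
  let cut : Int := (PySem.List.min? nonFuture (fun x => x)).getD (lines.length : Int)
  if cut > 0 then cut - 1 else -1

-- ===== PRECONDITION & SPEC =====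
def Spec_find_future_block (lines : List String) (out : Int) : Prop := out = find_future_block_alt lines
instance (lines : List String) (out : Int) : Decidable (Spec_find_future_block lines out) := by unfold Spec_find_future_block; infer_instance

-- ===== CLAIM =====
def Claim_equal_find_future_block : Prop := ∀ (lines : List String), Dom_find_future_block lines → Spec_find_future_block lines (find_future_block lines)

-- ===== LEMMAS AND PROOFS =====

-- A's loop once the first line was a future import returns last-index-of-prefix
theorem pvLoopA_found (rest : List String) : ∀ (idx : Nat), 1 ≤ idx →
    pvLoopA rest idx ((idx : Int) - 1) true = (idx : Int) - 1 + (rest.takeWhile pvIsFuture).length := by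
  induction rest with
  | nil => intro idx _; simp [pvLoopA]
  | cons line rest ih =>
    intro idx hidx
    by_cases hf : pvIsFuture line = true
    · have h1 : ¬ (idx = 0 ∧ pvIsFuture line = true) := by omega
      have := ih (idx + 1) (by omega)
      simp only [pvLoopA, h1, hf, if_true]
      rw [show ((idx : Nat) : Int) = ((idx + 1 : Nat) : Int) - 1 by push_cast; ring, this]
      simp [List.takeWhile, hf]
    · have h1 : ¬ (idx = 0 ∧ pvIsFuture line = true) := by simp [hf]
      simp [pvLoopA, h1, hf, List.takeWhile]

-- A as a takeWhile-length formula
theorem find_future_block_eq_takeWhile (lines : List String) :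
    find_future_block lines =
      (if (lines.takeWhile pvIsFuture).length > 0
       then ((lines.takeWhile pvIsFuture).length : Int) - 1 else -1) := by
  cases lines with
  | nil => simp [find_future_block, pvLoopA]
  | cons line rest =>
    by_cases hf : pvIsFuture line = true
    · have h := pvLoopA_found rest 1 (le_refl 1)
      norm_num at h
      simp [find_future_block, pvLoopA, hf, h, List.takeWhile]
    · simp [find_future_block, pvLoopA, hf, List.takeWhile]

-- every index produced by enumerate with start s is ≥ s
theorem mem_nf_ge (l : List String) (s : Int) (y : Int)
    (hy : y ∈ ((PySem.List.enumerate l s).filter (fun p => !(pvIsFuture p.2))).map (fun p => p.1)) :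
    s ≤ y := by
  rcases List.mem_map.mp hy with ⟨p, hp, rfl⟩
  have hp' := (List.mem_filter.mp hp).1
  rcases (PySem.List.mem_enumerate_iff _ _ _).mp hp' with ⟨k, hk, rfl⟩
  simp

-- min of the non-future indices (default s + len) = s + length of leading future run
theorem min_nf (l : List String) : ∀ (s : Int),
    ((PySem.List.min? (((PySem.List.enumerate l s).filter (fun p => !(pvIsFuture p.2))).map (fun p => p.1)) (fun x => x)).getD (s + (l.length : Int)))
      = s + ((l.takeWhile pvIsFuture).length : Int) := by
  induction l with
  | nil => intro s; simp [PySem.List.enumerate, PySem.List.min?]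
  | cons line rest ih =>
    intro s
    by_cases hf : pvIsFuture line = true
    · have h := ih (s + 1)
      have hlst : ((PySem.List.enumerate (line :: rest) s).filter (fun p => !(pvIsFuture p.2))).map (fun p => p.1)
          = ((PySem.List.enumerate rest (s + 1)).filter (fun p => !(pvIsFuture p.2))).map (fun p => p.1) := by
        simp [PySem.List.enumerate_cons, List.filter_cons, hf]
      rw [hlst]
      rw [show s + (((line :: rest).length : Nat) : Int) = (s + 1) + (rest.length : Int) by simp; ring]
      rw [h]
      have hlen : (List.takeWhile pvIsFuture (line :: rest)).length
          = (List.takeWhile pvIsFuture rest).length + 1 := by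
        simp [List.takeWhile, hf]
      rw [hlen]
      push_cast
      ring
    · -- head index s is in the list and is the minimum
      have hlst : ((PySem.List.enumerate (line :: rest) s).filter (fun p => !(pvIsFuture p.2))).map (fun p => p.1)
          = s :: ((PySem.List.enumerate rest (s + 1)).filter (fun p => !(pvIsFuture p.2))).map (fun p => p.1) := by
        simp [PySem.List.enumerate_cons, List.filter_cons, hf]
      rw [hlst]
      set t := ((PySem.List.enumerate rest (s + 1)).filter (fun p => !(pvIsFuture p.2))).map (fun p => p.1) with ht
      obtain ⟨m, hm⟩ : ∃ m, PySem.List.min? (s :: t) (fun x => x) = some m := by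
        cases hcase : PySem.List.min? (s :: t) (fun x => x) with
        | none => exact absurd ((PySem.List.min?_eq_none_iff _ _).mp hcase) (by simp)
        | some m => exact ⟨m, rfl⟩
      have hmem := PySem.List.min?_mem hm
      have hmin := PySem.List.min?_isMin hm s (by simp)
      have hge : s ≤ m := by
        rcases List.mem_cons.mp hmem with rfl | hmt
        · exact le_refl _
        · exact mem_nf_ge rest (s + 1) m (ht ▸ hmt) |>.trans' (by omega)
      have hm' : m = s := le_antisymm hmin hge
      rw [hm]
      simp [hm', List.takeWhile, hf]

theorem find_future_block_eq_alt (lines : List String) :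
    find_future_block lines = find_future_block_alt lines := by
  have hmin := min_nf lines 0
  simp only [zero_add] at hmin
  rw [find_future_block_eq_takeWhile]
  simp only [find_future_block_alt, hmin]
  by_cases h : (lines.takeWhile pvIsFuture).length > 0
  · simp [h]
  · simp at h
    simp [h]

-- ===== VERDICT =====
theorem find_future_block_spec : Claim_equal_find_future_block := by
  intro lines _
  exact find_future_block_eq_alt lines
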